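-- pv_equiv track=rewrite | github.com/jhgdike/leetCode | leetcode_python/701-800/768.py | find_first_word
-- ===== SOURCE A (Python) =====
-- def find_first_word(S):
--     left, right = 1, 0
--     for i in range(len(S) - 1, 0, -1):
--         if S[i] == S[0]:
--             right = i
--             break
--     if right == 0:
--         return right
--     while left < right:
--         for i in range(len(S) - 1, right, -1):
--             if S[i] == S[left]:
--                 right = i
--                 break
--         left += 1
--     return right
-- ===== SOURCE B (Python) =====
-- # B: one pass to build a last-occurrence index, then a single linear sweep
-- # (A rescans the string backwards for every left position).
-- def find_first_word(S):
--     last = {c: i for i, c in enumerate(S)}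
--     if not S or last[S[0]] == 0:
--         return 0
--     r = last[S[0]]
--     for i in range(1, len(S)):
--         if i >= r:
--             break
--         if last[S[i]] > r:
--             r = last[S[i]]
--     return r
-- ===== Notes on version B (the rewrite author's own statement) =====
-- stated objective: faster
-- what changed: Replaces A's repeated backward scans (one per left position) by a dict of each character's last occurrence built in one pass, followed by a single forward sweep taking the max of last occurrences.
import Mathlib
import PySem

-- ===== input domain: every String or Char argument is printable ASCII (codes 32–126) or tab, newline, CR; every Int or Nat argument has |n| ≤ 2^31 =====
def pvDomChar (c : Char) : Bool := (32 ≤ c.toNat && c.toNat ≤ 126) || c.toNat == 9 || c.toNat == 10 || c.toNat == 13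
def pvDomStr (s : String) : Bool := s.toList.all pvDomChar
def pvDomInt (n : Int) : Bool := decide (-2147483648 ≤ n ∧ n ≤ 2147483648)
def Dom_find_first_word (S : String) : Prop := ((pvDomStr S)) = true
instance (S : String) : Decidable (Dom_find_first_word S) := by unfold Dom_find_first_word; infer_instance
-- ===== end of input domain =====

-- B replaces A's per-left-position backward scans with a last-occurrence dict and one linear sweep (objective: faster).

-- ===== PORT A =====
-- backward for-loop with break: 'for i in range(len(S)-1, lo, -1): if S[i] == c: right = i; break'
-- modelled as a first-match fold over the same range (break = keep the first hit).
def pvScan (L : List Char) (c : Option Char) (lo : Int) : Option Int :=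
  (PySem.List.pyRange ((L.length : Int) - 1) lo (-1)).foldl
    (fun acc i => match acc with
      | some _ => acc
      | none => if PySem.List.pyGet? L i = c then some i else none) none

-- the 'while left < right' loop; fuel = len(S) always suffices (left grows by 1 each
-- iteration and the loop runs only while left < right < len(S)), so this is the same loop.
def pvWhileA (L : List Char) : Nat → Int → Int → Int
  | 0, _, right => right
  | fuel + 1, left, right =>
    if left < right then
      let right' := match pvScan L (PySem.List.pyGet? L left) right with
        | some j => j
        | none => right
      pvWhileA L fuel (left + 1) right'
    else right

def find_first_word (S : String) : Int :=
  let L := S.toList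
  -- first loop: right = last i in range(len(S)-1, 0, -1) with S[i] == S[0], else 0
  match pvScan L (PySem.List.pyGet? L 0) 0 with
  | none => 0            -- right == 0: return right
  | some r => pvWhileA L L.length 1 r

-- ===== PORT B =====
-- last = {c: i for i, c in enumerate(S)}
def pvLastDict (L : List Char) : PySem.Dict Char Int :=
  (PySem.List.enumerate L 0).foldl (fun d p => d.insert p.2 p.1) PySem.Dict.empty

-- the for-loop with break: state (r, broken)
def pvStepB (last : PySem.Dict Char Int) (L : List Char) (st : Int × Bool) (i : Int) : Int × Bool :=
  if st.2 then st
  else if st.1 ≤ i then (st.1, true)          -- if i >= r: break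
  else
    let li := last.getD (PySem.List.pyGetD L i ' ') 0   -- last[S[i]]; i is in range, S[i] is a key
    if st.1 < li then (li, false) else st

def find_first_word_alt (S : String) : Int :=
  let L := S.toList
  let last := pvLastDict L
  match L with
  | [] => 0                                   -- 'if not S ...: return 0'
  | c0 :: _ =>
    let r0 := last.getD c0 0                  -- last[S[0]]; S[0] is a key of last
    if r0 = 0 then 0
    else
      ((PySem.List.pyRange 1 (L.length : Int) 1).foldl (pvStepB last L) (r0, false)).1

-- ===== PRECONDITION & SPEC =====
def Spec_find_first_word (S : String) (out : Int) : Prop := out = find_first_word_alt S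
instance (S : String) (out : Int) : Decidable (Spec_find_first_word S out) := by unfold Spec_find_first_word; infer_instance

-- ===== CLAIM (what is proved, stated in full; the proofs are below) =====
def Claim_equal_find_first_word : Prop := ∀ (S : String), Dom_find_first_word S → Spec_find_first_word S (find_first_word S)

-- ===== LEMMAS AND PROOFS =====

-- spec helper: last occurrence of c in L, with offset s
def pvLastI (L : List Char) (s : Int) (c : Char) : Option Int :=
  match L with
  | [] => none
  | x :: xs =>
    match pvLastI xs (s + 1) c with
    | some j => some j
    | none => if x = c then some s else none

theorem pvLastI_dict (L : List Char) : ∀ (s : Int) (d : PySem.Dict Char Int) (c : Char),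
    ((PySem.List.enumerate L s).foldl (fun d p => d.insert p.2 p.1) d).get? c =
      match pvLastI L s c with
      | some j => some j
      | none => d.get? c := by
  induction L with
  | nil => intro s d c; simp [pvLastI, PySem.List.enumerate_nil]
  | cons x xs ih =>
    intro s d c
    rw [PySem.List.enumerate_cons]
    simp only [List.foldl_cons]
    rw [ih (s + 1) (d.insert x s) c]
    simp only [pvLastI]
    cases h : pvLastI xs (s + 1) c with
    | some j => simp
    | none =>
      simp only
      rw [PySem.Dict.get?_insert]
      by_cases hc : x = c
      · simp [hc]
      · simp [hc, Ne.symm hc]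

theorem pvLastI_none (L : List Char) : ∀ (s : Int) (c : Char), pvLastI L s c = none →
    ∀ k : Nat, (h : k < L.length) → L[k] ≠ c := by
  induction L with
  | nil => intro s c _ k h; simp at h
  | cons x xs ih =>
    intro s c hn k hk
    simp only [pvLastI] at hn
    cases h : pvLastI xs (s + 1) c with
    | some j => simp [h] at hn
    | none =>
      rw [h] at hn
      simp only at hn
      split_ifs at hn with hx
      cases k with
      | zero => simpa using hx
      | succ k' =>
        simp only [List.getElem_cons_succ]
        exact ih (s + 1) c h k' (by simpa using hk)

theorem pvLastI_some (L : List Char) : ∀ (s j : Int) (c : Char), pvLastI L s c = some j →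
    ∃ (k : Nat) (h : k < L.length), j = s + k ∧ L[k] = c ∧
      ∀ k' : Nat, k < k' → (h : k' < L.length) → L[k'] ≠ c := by
  induction L with
  | nil => intro s j c h; simp [pvLastI] at h
  | cons x xs ih =>
    intro s j c hs
    simp only [pvLastI] at hs
    cases h : pvLastI xs (s + 1) c with
    | some j' =>
      rw [h] at hs; simp only [Option.some.injEq] at hs; subst hs
      obtain ⟨k, hk, hj, hc, hab⟩ := ih (s + 1) _ c h
      refine ⟨k + 1, by simpa using Nat.succ_lt_succ hk, by push_cast at hj ⊢; omega, by simpa using hc, ?_⟩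
      intro k' hk' hlt
      cases k' with
      | zero => omega
      | succ k'' =>
        simp only [List.getElem_cons_succ]
        exact hab k'' (by omega) (by simpa using hlt)
    | none =>
      rw [h] at hs
      simp only at hs
      split_ifs at hs with hx
      simp only [Option.some.injEq] at hs; subst hs
      refine ⟨0, by simp, by simp, by simpa using hx, ?_⟩
      intro k' hk' hlt
      cases k' with
      | zero => omega
      | succ k'' =>
        simp only [List.getElem_cons_succ]
        exact pvLastI_none xs (s + 1) c h k'' (by simpa using hlt)

theorem pvFold_aux (L : List Char) (c : Option Char) : ∀ (l : List Int) (acc : Option Int),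
    l.foldl (fun acc i => match acc with
      | some _ => acc
      | none => if PySem.List.pyGet? L i = c then some i else none) acc
    = match acc with
      | some j => some j
      | none => l.find? (fun i => decide (PySem.List.pyGet? L i = c)) := by
  intro l
  induction l with
  | nil => intro acc; cases acc <;> simp
  | cons i l ih =>
    intro acc
    cases acc with
    | some j => simp only [List.foldl_cons]; rw [ih]
    | none =>
      simp only [List.foldl_cons]
      by_cases h : PySem.List.pyGet? L i = c
      · rw [if_pos h, ih, List.find?_cons_of_pos (by simpa using h)]
      · rw [if_neg h, ih, List.find?_cons_of_neg (by simpa using h)]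

theorem pvScan_eq_find (L : List Char) (c : Option Char) (lo : Int) :
    pvScan L c lo = (PySem.List.pyRange ((L.length : Int) - 1) lo (-1)).find?
      (fun i => decide (PySem.List.pyGet? L i = c)) := by
  unfold pvScan
  rw [pvFold_aux]

theorem pvScan_spec (L : List Char) (c : Char) : ∀ (fuel : Nat) (a lo : Int),
    (a - lo).toNat ≤ fuel → 0 ≤ lo → a < (L.length : Int) →
    (∀ k : Nat, a < (k : Int) → (h : k < L.length) → L[k] ≠ c) →
    (PySem.List.pyRange a lo (-1)).find? (fun i => decide (PySem.List.pyGet? L i = some c)) =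
      match pvLastI L 0 c with
      | some j => if lo < j then some j else none
      | none => none := by
  intro fuel
  induction fuel with
  | zero =>
    intro a lo hf h0 hn habove
    have hle : a ≤ lo := by omega
    rw [PySem.List.pyRange_neg_one_eq_nil hle]
    cases h : pvLastI L 0 c with
    | none => simp
    | some j =>
      obtain ⟨k, hk, hj, hc, _⟩ := pvLastI_some L 0 j c h
      have hka : (k : Int) ≤ a := by
        by_contra hlt
        exact habove k (by omega) hk hc
      simp only [List.find?_nil]
      rw [if_neg (by omega)]
  | succ fuel ih =>
    intro a lo hf h0 hn habove
    by_cases hle : a ≤ lo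
    · -- same as the base case: empty range
      rw [PySem.List.pyRange_neg_one_eq_nil hle]
      cases h : pvLastI L 0 c with
      | none => simp
      | some j =>
        obtain ⟨k, hk, hj, hc, _⟩ := pvLastI_some L 0 j c h
        have hka : (k : Int) ≤ a := by
          by_contra hlt
          exact habove k (by omega) hk hc
        simp only [List.find?_nil]
        rw [if_neg (by omega)]
    · have hlo : lo < a := by omega
      rw [PySem.List.pyRange_neg_one_cons hlo]
      have hget : PySem.List.pyGet? L a = some (L[a.toNat]'(by omega)) :=
        PySem.List.pyGet?_eq_some_getElem L (by omega) hn
      by_cases hca : L[a.toNat]'(by omega) = c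
      · rw [List.find?_cons_of_pos (by simp [hget, hca])]
        -- the last occurrence is exactly a
        cases h : pvLastI L 0 c with
        | none => exact absurd hca (pvLastI_none L 0 c h a.toNat (by omega))
        | some j =>
          obtain ⟨k, hk, hj, hc, hab⟩ := pvLastI_some L 0 j c h
          have hka : (k : Int) ≤ a := by
            by_contra hlt
            exact habove k (by omega) hk hc
          have hak : (a : Int) ≤ k := by
            by_contra hlt
            exact hab a.toNat (by omega) (by omega) hca
          have : j = a := by omega
          subst this
          simp [hlo]
      · rw [List.find?_cons_of_neg (by simp [hget, hca])]
        exact ih (a - 1) lo (by omega) h0 (by omega) (by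
          intro k hk hkl
          by_cases hka : (k : Int) = a
          · have : k = a.toNat := by omega
            subst this
            exact hca
          · exact habove k (by omega) hkl)

theorem pvDict_getD (L : List Char) (c : Char) :
    (pvLastDict L).getD c 0 = match pvLastI L 0 c with
      | some j => j
      | none => 0 := by
  rw [PySem.Dict.getD_eq_get?_getD]
  unfold pvLastDict
  rw [pvLastI_dict L 0 PySem.Dict.empty c]
  cases pvLastI L 0 c <;> simp

theorem pvStepB_broken (last : PySem.Dict Char Int) (L : List Char) :
    ∀ (l : List Int) (r : Int), l.foldl (pvStepB last L) (r, true) = (r, true) := by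
  intro l
  induction l with
  | nil => intro r; simp
  | cons i l ih => intro r; simp only [List.foldl_cons, pvStepB]; exact ih r

theorem pvLoop_eq (L : List Char) : ∀ (fuel : Nat) (left r : Int),
    1 ≤ left → 0 < r → r < (L.length : Int) → (L.length : Int) ≤ left + fuel →
    pvWhileA L fuel left r =
      ((PySem.List.pyRange left (L.length : Int) 1).foldl (pvStepB (pvLastDict L) L) (r, false)).1 := by
  intro fuel
  induction fuel with
  | zero =>
    intro left r h1 hr0 hrn hfu
    rw [PySem.List.pyRange_one_eq_nil (by omega)]
    simp [pvWhileA]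
  | succ fuel ih =>
    intro left r h1 hr0 hrn hfu
    by_cases hlr : left < r
    · have hln : left < (L.length : Int) := by omega
      have hl0 : 0 ≤ left := by omega
      have hltn : left.toNat < L.length := by omega
      have hget : PySem.List.pyGet? L left = some (L[left.toNat]) :=
        PySem.List.pyGet?_eq_some_getElem L hl0 (by omega)
      have hscan : pvScan L (PySem.List.pyGet? L left) r =
          match pvLastI L 0 (L[left.toNat]'hltn) with
          | some j => if r < j then some j else none
          | none => none := by
        rw [hget, pvScan_eq_find]
        exact pvScan_spec L _ L.length ((L.length : Int) - 1) r (by omega) (by omega) (by omega)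
          (by intro k hk hkl; exact absurd hkl (by omega))
      cases hL : pvLastI L 0 (L[left.toNat]'hltn) with
      | none => exact absurd rfl (pvLastI_none L 0 _ hL left.toNat hltn)
      | some lam =>
        obtain ⟨k0, hk0, hj, hc0, hab⟩ := pvLastI_some L 0 lam _ hL
        have hlam_ge : left ≤ lam := by
          by_contra hlt
          exact hab left.toNat (by omega) hltn rfl
        rw [hL] at hscan
        have hgetD : PySem.List.pyGetD L left ' ' = L[left.toNat]'hltn :=
          PySem.List.pyGetD_eq_getElem L ' ' hl0 (by omega)
        have hdict : (pvLastDict L).getD (PySem.List.pyGetD L left ' ') 0 = lam := by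
          rw [hgetD, pvDict_getD, hL]
        rw [PySem.List.pyRange_one_cons hln]
        simp only [List.foldl_cons, pvStepB, hdict]
        simp only [pvWhileA, if_pos hlr, hscan]
        by_cases hrl : r < lam
        · simp only [if_pos hrl, if_neg (show ¬ r ≤ left by omega)]
          exact ih (left + 1) lam (by omega) (by omega) (by omega) (by omega)
        · simp only [if_neg hrl, if_neg (show ¬ r ≤ left by omega)]
          exact ih (left + 1) r (by omega) hr0 hrn (by omega)
    · simp only [pvWhileA, if_neg hlr]
      by_cases hln : (L.length : Int) ≤ left
      · rw [PySem.List.pyRange_one_eq_nil hln]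
        simp
      · rw [PySem.List.pyRange_one_cons (by omega)]
        simp [pvStepB, show r ≤ left by omega, pvStepB_broken]

theorem find_first_word_spec : Claim_equal_find_first_word := by
  intro S _
  unfold Spec_find_first_word
  simp only [find_first_word, find_first_word_alt]
  cases hL : S.toList with
  | nil => decide
  | cons c0 xs =>
    have hget0 : PySem.List.pyGet? (c0 :: xs) 0 = some c0 := PySem.List.pyGet?_zero_cons c0 xs
    have hn1 : 1 ≤ ((c0 :: xs).length : Int) := by simp
    have hscan0 : pvScan (c0 :: xs) (PySem.List.pyGet? (c0 :: xs) 0) 0 =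
        match pvLastI (c0 :: xs) 0 c0 with
        | some j => if 0 < j then some j else none
        | none => none := by
      rw [hget0, pvScan_eq_find]
      exact pvScan_spec (c0 :: xs) c0 (c0 :: xs).length (((c0 :: xs).length : Int) - 1) 0
        (by omega) (by omega) (by omega)
        (by intro k hk hkl; exact absurd hkl (by omega))
    cases hLI : pvLastI (c0 :: xs) 0 c0 with
    | none =>
      exact absurd (show (c0 :: xs)[0] = c0 from rfl) (pvLastI_none (c0 :: xs) 0 c0 hLI 0 (by simp))
    | some lam =>
      obtain ⟨k0, hk0, hj, hc0, hab⟩ := pvLastI_some (c0 :: xs) 0 lam c0 hLI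
      have hdict : (pvLastDict (c0 :: xs)).getD c0 0 = lam := by
        rw [pvDict_getD, hLI]
      rw [hLI] at hscan0
      simp only [hscan0, hdict]
      by_cases hlam : 0 < lam
      · rw [if_pos hlam, if_neg (by omega)]
        exact pvLoop_eq (c0 :: xs) (c0 :: xs).length 1 lam (by omega) hlam (by omega)
          (by omega)
      · rw [if_neg hlam, if_pos (by omega)]
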